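-- pv_equiv track=rewrite | github.com/decajoin/algorithms-homework-2024 | HomeWork2/code/CodeA_2.py | find_max_blank_square_prefix_sum
-- ===== SOURCE A (Python) =====
-- def find_max_blank_square_prefix_sum(matrix, L):
--     M = len(matrix)
--     N = len(matrix[0])
--
--     prefix_sum = [[0] * (N + 1) for _ in range(M + 1)]
--
--     for i in range(1, M + 1):
--         for j in range(1, N + 1):
--             prefix_sum[i][j] = prefix_sum[i-1][j] + prefix_sum[i][j-1] - prefix_sum[i-1][j-1] + (1 if matrix[i-1][j-1] == 0 else 0)
--
--     max_count = -1
--     max_position = (-1, -1)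
--
--     for i in range(M - L + 1):
--         for j in range(N - L + 1):
--             total = prefix_sum[i+L][j+L] - prefix_sum[i][j+L] - prefix_sum[i+L][j] + prefix_sum[i][j]
--             if total > max_count:
--                 max_count = total
--                 max_position = (i + 1, j + 1)
--
--     return max_position, max_count
-- ===== SOURCE B (Python) =====
-- def find_max_blank_square_prefix_sum(matrix, L):
--     M = len(matrix)
--     N = len(matrix[0])
--     max_count = -1
--     max_position = (-1, -1)
--     for i in range(M - L + 1):
--         for j in range(N - L + 1):
--             total = sum(1 for di in range(L) for dj in range(L)
--                         if matrix[i + di][j + dj] == 0)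
--             if total > max_count:
--                 max_count = total
--                 max_position = (i + 1, j + 1)
--     return max_position, max_count
-- ===== Notes on version B (the rewrite author's own statement) =====
-- stated objective: simpler
-- what changed: Replaces the (M+1)x(N+1) prefix-sum table with a direct per-window count of zeros over each LxL block, keeping the same i-then-j scan order, strict > update and (-1,-1)/-1 defaults.
import Mathlib
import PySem

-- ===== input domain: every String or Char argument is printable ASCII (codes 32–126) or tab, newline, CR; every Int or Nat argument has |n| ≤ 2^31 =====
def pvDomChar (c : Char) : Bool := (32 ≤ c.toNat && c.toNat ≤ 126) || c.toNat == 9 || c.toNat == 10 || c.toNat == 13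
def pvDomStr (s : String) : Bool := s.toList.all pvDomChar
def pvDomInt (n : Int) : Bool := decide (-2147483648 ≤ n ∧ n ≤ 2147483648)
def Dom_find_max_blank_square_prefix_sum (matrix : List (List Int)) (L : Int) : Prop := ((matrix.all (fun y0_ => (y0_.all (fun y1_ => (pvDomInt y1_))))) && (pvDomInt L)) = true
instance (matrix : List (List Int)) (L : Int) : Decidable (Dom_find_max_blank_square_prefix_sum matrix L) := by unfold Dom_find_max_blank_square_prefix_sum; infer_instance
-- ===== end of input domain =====

-- B drops A's prefix-sum table and counts the zeros of each L×L window directly (simpler, same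
-- scan order, strict-> update and (-1,-1)/-1 defaults); equivalence proved on Pre_ below.

-- ===== PORT A =====
-- A's indicator (1 if matrix[i-1][j-1] == 0 else 0)
def pvZind (a : Int) : Int := if a = 0 then 1 else 0

-- inner loop 'for j in range(1, N+1)': fills the current prefix row left to right;
-- pl = prefix_sum[i-1][j-1], cl = prefix_sum[i][j-1]
def pvA_rowAux (pl cl : Int) : List Int → List Int → List Int
  | p :: ps, a :: rest =>
      let c := p + cl - pl + pvZind a
      c :: pvA_rowAux p c ps rest
  | _, _ => []

-- one iteration of 'for i in range(1, M+1)': previous prefix row (starts with 0) + matrix row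
def pvA_row (prev : List Int) (row : List Int) : List Int :=
  match prev with
  | p0 :: ps => 0 :: pvA_rowAux p0 0 ps row
  | [] => [0]

-- the outer loop: each prefix row is computed from the previous one (row 0 is all zeros)
def pvA_rows (prev : List Int) : List (List Int) → List (List Int)
  | [] => []
  | r :: rs => pvA_row prev r :: pvA_rows (pvA_row prev r) rs

def pvA_table (matrix : List (List Int)) (N : Nat) : List (List Int) :=
  List.replicate (N + 1) (0 : Int) :: pvA_rows (List.replicate (N + 1) (0 : Int)) matrix

-- prefix_sum[i][j]; indices are in range whenever Pre_ holds (default never read there)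
def pvGet2 (t : List (List Int)) (i j : Int) : Int :=
  PySem.List.pyGetD (PySem.List.pyGetD t i []) j 0

def find_max_blank_square_prefix_sum (matrix : List (List Int)) (L : Int) : (Int × Int) × Int :=
  match matrix with
  | [] => ((-1, -1), -1)   -- Python raises IndexError on len(matrix[0]); outside Pre_
  | row0 :: _ =>
    let M : Int := matrix.length
    let N : Int := row0.length
    let ps := pvA_table matrix row0.length
    (PySem.List.pyRange 0 (M - L + 1) 1).foldl (fun st i =>
      (PySem.List.pyRange 0 (N - L + 1) 1).foldl (fun st j =>
        let total := pvGet2 ps (i + L) (j + L) - pvGet2 ps i (j + L)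
                       - pvGet2 ps (i + L) j + pvGet2 ps i j
        if total > st.2 then ((i + 1, j + 1), total) else st) st)
      ((-1, -1), -1)

-- ===== PORT B =====
-- total = sum(1 for di in range(L) for dj in range(L) if matrix[i+di][j+dj] == 0)
def pvB_count (matrix : List (List Int)) (L i j : Int) : Int :=
  (PySem.List.pyRange 0 L 1).foldl (fun acc di =>
    (PySem.List.pyRange 0 L 1).foldl (fun acc dj =>
      if PySem.List.pyGetD (PySem.List.pyGetD matrix (i + di) []) (j + dj) 1 = 0
      then acc + 1 else acc) acc) 0

def find_max_blank_square_prefix_sum_alt (matrix : List (List Int)) (L : Int) : (Int × Int) × Int :=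
  match matrix with
  | [] => ((-1, -1), -1)   -- Python raises IndexError on len(matrix[0]); outside Pre_
  | row0 :: _ =>
    let M : Int := matrix.length
    let N : Int := row0.length
    (PySem.List.pyRange 0 (M - L + 1) 1).foldl (fun st i =>
      (PySem.List.pyRange 0 (N - L + 1) 1).foldl (fun st j =>
        let total := pvB_count matrix L i j
        if total > st.2 then ((i + 1, j + 1), total) else st) st)
      ((-1, -1), -1)

-- ===== PRECONDITION & SPEC =====
-- A raises IndexError on the empty matrix, whenever L < 0 (the window scan then indexes past
-- row N-L ≥ N+1 of the table), and when some row is shorter than row 0; Pre_ excludes exactly those.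
def Pre_find_max_blank_square_prefix_sum (matrix : List (List Int)) (L : Int) : Prop :=
  matrix ≠ [] ∧ 0 ≤ L ∧ ∀ r ∈ matrix, (matrix.headD []).length ≤ r.length

instance (matrix : List (List Int)) (L : Int) : Decidable (Pre_find_max_blank_square_prefix_sum matrix L) := by
  unfold Pre_find_max_blank_square_prefix_sum; infer_instance

def pvWitness_find_max_blank_square_prefix_sum : List (List Int) × Int := ([[0, 1, 0], [1, 0, 0], [0, 0, 0]], 2)

def Spec_find_max_blank_square_prefix_sum (matrix : List (List Int)) (L : Int) (out : (Int × Int) × Int) : Prop := out = find_max_blank_square_prefix_sum_alt matrix L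
instance (matrix : List (List Int)) (L : Int) (out : (Int × Int) × Int) : Decidable (Spec_find_max_blank_square_prefix_sum matrix L out) := by unfold Spec_find_max_blank_square_prefix_sum; infer_instance

-- ===== CLAIM (what is proved, stated in full; the proofs are below) =====
def Claim_equal_find_max_blank_square_prefix_sum : Prop := ∀ (matrix : List (List Int)) (L : Int), Dom_find_max_blank_square_prefix_sum matrix L → Pre_find_max_blank_square_prefix_sum matrix L → Spec_find_max_blank_square_prefix_sum matrix L (find_max_blank_square_prefix_sum matrix L)

-- ===== LEMMAS AND PROOFS =====

-- number of zeros among the first j entries of a row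
def pvZr (r : List Int) (j : Nat) : Int := ((r.take j).map pvZind).sum
-- number of zeros in the first i rows restricted to the first j columns
def pvZc (m : List (List Int)) (i j : Nat) : Int := ((m.take i).map (fun r => pvZr r j)).sum

-- running sums of indicators along a row, offset by z
def pvZsums (z : Int) : List Int → List Int
  | [] => []
  | a :: rest => (z + pvZind a) :: pvZsums (z + pvZind a) rest

theorem pvA_rowAux_spec (row : List Int) : ∀ (ps : List Int) (pl z : Int),
    pvA_rowAux pl (pl + z) ps row = List.zipWith (fun p s => p + s) ps (pvZsums z row) := by
  induction row with
  | nil => intro ps pl z; cases ps <;> simp [pvA_rowAux, pvZsums]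
  | cons a rest ih =>
    intro ps pl z
    cases ps with
    | nil => simp [pvA_rowAux, pvZsums]
    | cons p ps' =>
      show pvA_rowAux pl (pl + z) (p :: ps') (a :: rest) = _
      have harg : p + (pl + z) - pl + pvZind a = p + (z + pvZind a) := by ring
      simp only [pvA_rowAux, pvZsums, List.zipWith_cons_cons, harg]
      rw [ih ps' p (z + pvZind a)]

theorem pvA_row_spec (ps row : List Int) :
    pvA_row (0 :: ps) row = 0 :: List.zipWith (fun p s => p + s) ps (pvZsums 0 row) := by
  have h := pvA_rowAux_spec row ps 0 0
  simpa [pvA_row] using h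

theorem pvZsums_length (row : List Int) (z : Int) : (pvZsums z row).length = row.length := by
  induction row generalizing z with
  | nil => rfl
  | cons a rest ih => simp [pvZsums, ih]

theorem pvZsums_getElem (row : List Int) (z : Int) (k : Nat) (hk : k < row.length) :
    (pvZsums z row)[k]'(by rw [pvZsums_length]; exact hk) = z + pvZr row (k + 1) := by
  induction row generalizing z k with
  | nil => simp at hk
  | cons a rest ih =>
    cases k with
    | zero => simp [pvZsums, pvZr]
    | succ k' =>
      have hk' : k' < rest.length := by simpa using hk
      have := ih z k' hk'
      simp only [pvZsums, List.getElem_cons_succ]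
      rw [ih (z + pvZind a) k' hk']
      simp [pvZr, List.take_succ_cons]
      ring

theorem pvA_rows_getD (m : List (List Int)) : ∀ (ps : List Int) (i j : Nat),
    i < m.length → j ≤ ps.length → (∀ r ∈ m, ps.length ≤ r.length) →
    ((pvA_rows (0 :: ps) m).getD i []).getD j 0 = (0 :: ps).getD j 0 + pvZc m (i + 1) j := by
  induction m with
  | nil => intro ps i j hi; simp at hi
  | cons r rest ih =>
    intro ps i j hi hj hr
    have hlen : ps.length ≤ r.length := by
      have := hr r (by simp); omega
    have hps' : (List.zipWith (fun p s => p + s) ps (pvZsums 0 r)).length = ps.length := by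
      simp [pvZsums_length]; omega
    have F : ∀ j' : Nat, j' ≤ ps.length →
        (0 :: List.zipWith (fun p s => p + s) ps (pvZsums 0 r)).getD j' 0
          = (0 :: ps).getD j' 0 + pvZr r j' := by
      intro j' hj'
      cases j' with
      | zero => simp [pvZr]
      | succ k =>
        have hk : k < ps.length := by omega
        have hkr : k < r.length := by omega
        rw [List.getD_cons_succ, List.getD_cons_succ,
            List.getD_eq_getElem _ _ (by omega), List.getD_eq_getElem _ _ hk]
        rw [List.getElem_zipWith]
        rw [pvZsums_getElem r 0 k hkr]
        ring
    simp only [pvA_rows, pvA_row_spec]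
    cases i with
    | zero =>
      simp only [List.getD_cons_zero]
      rw [F j hj]
      have : pvZc (r :: rest) 1 j = pvZr r j := by simp [pvZc]
      rw [this]
    | succ i' =>
      simp only [List.getD_cons_succ]
      have hrest : ∀ r' ∈ rest, (List.zipWith (fun p s => p + s) ps (pvZsums 0 r)).length ≤ r'.length := by
        intro r' hr'; rw [hps']; exact hr r' (by simp [hr'])
      rw [ih (List.zipWith (fun p s => p + s) ps (pvZsums 0 r)) i' j
            (by simpa using hi) (by omega) hrest]
      rw [F j hj]
      have : pvZc (r :: rest) (i' + 1 + 1) j = pvZr r j + pvZc rest (i' + 1) j := by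
        simp [pvZc, List.take_succ_cons]
      rw [this]
      ring

theorem pvTable_get (m : List (List Int)) (N : Nat) (i j : Nat)
    (hr : ∀ r ∈ m, N ≤ r.length) (hi : i ≤ m.length) (hj : j ≤ N) :
    pvGet2 (pvA_table m N) (i : Int) (j : Int) = pvZc m i j := by
  have hrep : (List.replicate (N + 1) (0 : Int)).getD j 0 = 0 := by
    rw [List.getD_eq_getElem _ _ (by simp; omega)]
    simp
  simp only [pvGet2, PySem.List.pyGetD_natCast, pvA_table]
  cases i with
  | zero => simp only [List.getD_cons_zero]; rw [hrep]; simp [pvZc]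
  | succ i' =>
    rw [List.getD_cons_succ]
    have hrep' : List.replicate (N + 1) (0 : Int) = 0 :: List.replicate N 0 := by
      simp [List.replicate_succ]
    rw [hrep']
    rw [pvA_rows_getD m (List.replicate N 0) i' j (by omega) (by simp [hj])
          (by intro r hrm; simp; exact hr r hrm)]
    have : (0 :: List.replicate N (0 : Int)).getD j 0 = 0 := by
      rw [← hrep']; exact hrep
    rw [this]
    ring

theorem pvSumMapSub (l : List (List Int)) (f g : List Int → Int) :
    (l.map (fun x => f x - g x)).sum = (l.map f).sum - (l.map g).sum := by
  induction l with
  | nil => simp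
  | cons x xs ih => simp [ih]; ring

theorem pvWindow_map {α β : Type} (xs : List α) (d : α) (g : α → β) (a : Nat) :
    ∀ (l : Nat), a + l ≤ xs.length →
    (List.range l).map (fun k => g (xs.getD (a + k) d)) = ((xs.drop a).take l).map g := by
  intro l
  induction l with
  | zero => intro _; simp
  | succ l' ih =>
    intro hl
    have hal : a + l' < xs.length := by omega
    rw [List.range_succ, List.map_append, ih (by omega)]
    have h1 : (xs.drop a).take (l' + 1) = (xs.drop a).take l' ++ [xs[a + l']] := by
      rw [List.take_add_one]
      have : (xs.drop a)[l']? = some xs[a + l'] := by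
        rw [List.getElem?_drop]
        exact List.getElem?_eq_getElem hal
      rw [this]
      rfl
    rw [h1, List.map_append]
    simp [List.getElem?_eq_getElem hal]

theorem pvB_count_spec (m : List (List Int)) (a b l : Nat)
    (ha : a + l ≤ m.length) (hb : ∀ r ∈ m, b + l ≤ r.length) :
    pvB_count m (l : Int) (a : Int) (b : Int)
      = (((m.drop a).take l).map (fun r => pvZr (r.drop b) l)).sum := by
  have inner : ∀ (r : List Int), b + l ≤ r.length → ∀ (acc : Int),
      (List.map (fun k : Nat => (k : Int)) (List.range l)).foldl
        (fun acc dj => if PySem.List.pyGetD r ((b : Int) + dj) 1 = 0 then acc + 1 else acc) acc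
      = acc + pvZr (r.drop b) l := by
    intro r hbr acc
    rw [List.foldl_map]
    rw [PySem.List.foldl_congr_mem _ _
          (fun (acc : Int) (k : Nat) => acc + pvZind (r.getD (b + k) 1)) _ ?_]
    · rw [PySem.List.foldl_add, pvWindow_map r 1 pvZind b l hbr]
      rfl
    · intro acc k _
      have hcast : ((b : Int) + (k : Int)) = ((b + k : Nat) : Int) := by push_cast; ring
      rw [hcast, PySem.List.pyGetD_natCast]
      unfold pvZind; split <;> simp_all [List.getD]
  unfold pvB_count
  rw [PySem.List.pyRange_zero_nat, List.foldl_map]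
  rw [PySem.List.foldl_congr_mem _ _
        (fun (acc : Int) (k : Nat) => acc + pvZr ((m.getD (a + k) []).drop b) l) _ ?_]
  · rw [PySem.List.foldl_add, pvWindow_map m [] (fun r => pvZr (r.drop b) l) a l ha]
    simp
  · intro acc k hk
    have hkl : k < l := List.mem_range.mp hk
    have hcast : ((a : Int) + (k : Int)) = ((a + k : Nat) : Int) := by push_cast; ring
    rw [hcast, PySem.List.pyGetD_natCast]
    have hmem : m.getD (a + k) [] ∈ m := by
      rw [List.getD_eq_getElem m [] (by omega)]
      exact List.getElem_mem _
    exact inner (m.getD (a + k) []) (hb _ hmem) acc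

theorem pvA_total_spec (m : List (List Int)) (N : Nat) (a b l : Nat)
    (hr : ∀ r ∈ m, N ≤ r.length) (ha : a + l ≤ m.length) (hb : b + l ≤ N) :
    pvGet2 (pvA_table m N) ((a + l : Nat) : Int) ((b + l : Nat) : Int)
      - pvGet2 (pvA_table m N) (a : Int) ((b + l : Nat) : Int)
      - pvGet2 (pvA_table m N) ((a + l : Nat) : Int) (b : Int)
      + pvGet2 (pvA_table m N) (a : Int) (b : Int)
      = (((m.drop a).take l).map (fun r => pvZr (r.drop b) l)).sum := by
  have hbl : b + l ≤ N := hb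
  have g1 := pvTable_get m N (a + l) (b + l) hr (by omega) (by omega)
  have g2 := pvTable_get m N a (b + l) hr (by omega) (by omega)
  have g3 := pvTable_get m N (a + l) b hr (by omega) (by omega)
  have g4 := pvTable_get m N a b hr (by omega) (by omega)
  rw [g1, g2, g3, g4]
  have hsplit : ∀ j : Nat, pvZc m (a + l) j
      = pvZc m a j + (((m.drop a).take l).map (fun r => pvZr r j)).sum := by
    intro j
    simp [pvZc, List.take_add]
  rw [hsplit (b + l), hsplit b]
  have hmap : ((m.drop a).take l).map (fun r => pvZr (r.drop b) l)
      = ((m.drop a).take l).map (fun r => pvZr r (b + l) - pvZr r b) := by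
    apply List.map_congr_left
    intro r _
    have : pvZr r (b + l) = pvZr r b + pvZr (r.drop b) l := by
      simp [pvZr, List.take_add]
    omega
  rw [hmap, pvSumMapSub]
  ring

-- ===== VERDICT (by name: the statement is the Claim_ definition above) =====
theorem find_max_blank_square_prefix_sum_spec : Claim_equal_find_max_blank_square_prefix_sum := by
  intro matrix L hdom hpre
  unfold Spec_find_max_blank_square_prefix_sum
  obtain ⟨hne, hL, hrows⟩ := hpre
  cases matrix with
  | nil => exact absurd rfl hne
  | cons row0 rest =>
    simp only [find_max_blank_square_prefix_sum, find_max_blank_square_prefix_sum_alt]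
    apply PySem.List.foldl_congr_mem
    intro st i hi
    apply PySem.List.foldl_congr_mem
    intro st' j hj
    have hi' := (PySem.List.mem_pyRange_one).mp hi
    have hj' := (PySem.List.mem_pyRange_one).mp hj
    have hia : i = ((i.toNat : Nat) : Int) := by omega
    have hjb : j = ((j.toNat : Nat) : Int) := by omega
    have hLl : L = ((L.toNat : Nat) : Int) := by omega
    have hN : ∀ r ∈ row0 :: rest, row0.length ≤ r.length := by
      intro r hr; simpa using hrows r hr
    have ha : i.toNat + L.toNat ≤ (row0 :: rest).length := by
      have := hi'.2; simp at this ⊢; omega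
    have hb : j.toNat + L.toNat ≤ row0.length := by
      have := hj'.2; simp at this ⊢; omega
    have hbrows : ∀ r ∈ row0 :: rest, j.toNat + L.toNat ≤ r.length := by
      intro r hr; exact le_trans hb (hN r hr)
    have htot : pvGet2 (pvA_table (row0 :: rest) row0.length) (i + L) (j + L)
          - pvGet2 (pvA_table (row0 :: rest) row0.length) i (j + L)
          - pvGet2 (pvA_table (row0 :: rest) row0.length) (i + L) j
          + pvGet2 (pvA_table (row0 :: rest) row0.length) i j
        = pvB_count (row0 :: rest) L i j := by
      rw [hia, hjb, hLl]
      have hc1 : ((i.toNat : Int) + (L.toNat : Int)) = ((i.toNat + L.toNat : Nat) : Int) := by push_cast; ring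
      have hc2 : ((j.toNat : Int) + (L.toNat : Int)) = ((j.toNat + L.toNat : Nat) : Int) := by push_cast; ring
      rw [hc1, hc2]
      rw [pvA_total_spec (row0 :: rest) row0.length i.toNat j.toNat L.toNat hN ha hb]
      rw [pvB_count_spec (row0 :: rest) i.toNat j.toNat L.toNat ha hbrows]
    simp only [htot]
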